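-- pv_equiv track=rewrite | github.com/clean-code-craft-tcq-4/tdd-buckets-d6fb7f0c-Abhishek27041998 | detect_range_and_count_readings.py | detect_range_and_count_readings
-- ===== SOURCE A (Python) =====
-- from typing import List, Dict, Tuple
--
-- def reset_values(inputs, index):
--     start = inputs[index]
--     end = inputs[index]
--     num = 1
--     return start, end, num
--
-- def check_if_inputs_valid(inputs: List[int]):
--     if inputs is None or len(inputs) == 0:
--         return False
--
--     return True
--
-- def detect_range_and_count_readings(inputs: List[int]):
--     # Output variable to store list of ranges along with number of readings
--     output: Dict[Tuple[int, int], int] = {}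
--
--     # If inputs lenght is 0 or is empty return {}
--     if not check_if_inputs_valid(inputs):
--         return output
--
--     # Sort inputs
--     inputs.sort()
--
--     # Define placeholders for range identification and count
--     start_range, end_range, num = reset_values(inputs, 0)
--
--     for i in range(1, len(inputs)):
--         eval = (inputs[i] == end_range + 1) | (inputs[i] == end_range)
--
--         if eval:
--             end_range = inputs[i]
--             num += 1
--             continue
--         else:
--             key = (start_range, end_range)
--             output[key] = num
--             start_range, end_range, num = reset_values(inputs, i)
--
--     key = (start_range, end_range)
--     output[key] = num
--
--     return output
-- ===== SOURCE B (Python) =====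
-- def detect_range_and_count_readings(inputs):
--     # Same contract as A; sorts `inputs` in place (same observable mutation).
--     if inputs is None or len(inputs) == 0:
--         return {}
--     inputs.sort()
--     # Frequency map of the readings.
--     counts = {}
--     for x in inputs:
--         counts[x] = counts.get(x, 0) + 1
--     # A value starts a range exactly when its predecessor is absent; extend each
--     # start forward through the present values, summing their frequencies.
--     output = {}
--     for start in sorted(s for s in counts if s - 1 not in counts):
--         end, total = start, counts[start]
--         while end + 1 in counts:
--             end += 1
--             total += counts[end]
--         output[(start, end)] = total
--     return output
-- ===== Notes on version B (the rewrite author's own statement) =====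
-- stated objective: alternative
-- what changed: B replaces A's adjacent-pair scan over the sorted list by a frequency-map algorithm: build a dict of counts, detect range starts as values whose predecessor is absent from the dict, and extend each start forward through present values summing frequencies (the classic hash-based consecutive-sequence technique).
import Mathlib
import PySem

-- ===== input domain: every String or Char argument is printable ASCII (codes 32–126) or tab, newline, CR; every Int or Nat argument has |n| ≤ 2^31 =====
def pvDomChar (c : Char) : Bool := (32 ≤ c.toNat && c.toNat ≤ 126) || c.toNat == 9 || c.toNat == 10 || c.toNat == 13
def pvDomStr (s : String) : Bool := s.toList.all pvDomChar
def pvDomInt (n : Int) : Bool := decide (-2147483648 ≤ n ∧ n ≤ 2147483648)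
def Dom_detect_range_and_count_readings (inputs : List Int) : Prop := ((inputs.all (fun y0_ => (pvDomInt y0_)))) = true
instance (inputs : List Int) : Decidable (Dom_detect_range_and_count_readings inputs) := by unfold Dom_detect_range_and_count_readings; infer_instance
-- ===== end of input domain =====

-- B replaces A's adjacent-pair scan over the sorted list by a frequency-map algorithm:
-- a counts dict, range starts = keys whose predecessor is absent, each start extended
-- forward through present keys summing frequencies (objective: alternative). Both
-- Pythons sort `inputs` in place; the equivalence proved here is about the RETURN value only.


-- ===== PORT A =====
-- reset_values(inputs, index): indices used are always in range, so pyGetD with default 0 is exact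
def pvResetValues (inputs : List Int) (index : Int) : Int × Int × Int :=
  (PySem.List.pyGetD inputs index 0, PySem.List.pyGetD inputs index 0, 1)

def pvCheckIfInputsValid (inputs : List Int) : Bool :=
  !(inputs.length == 0)

-- one iteration of A's for-loop; state = ((start_range, end_range, num), output)
def pvLoopA (st : (Int × Int × Int) × PySem.Dict (Int × Int) Int) (x : Int) :
    (Int × Int × Int) × PySem.Dict (Int × Int) Int :=
  match st with
  | ((s, e, n), d) =>
    if x = e + 1 ∨ x = e then ((s, x, n + 1), d)
    else ((x, x, 1), d.insert (s, e) n)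

def detect_range_and_count_readings (inputs : List Int) : List (Int × Int × Int) :=
  if !(pvCheckIfInputsValid inputs) then []
  else
    let ys := PySem.List.sorted inputs (fun x => x) false
    let init := pvResetValues ys 0
    let st := (PySem.List.pyRange 1 (ys.length : Int) 1).foldl
      (fun acc j => pvLoopA acc (PySem.List.pyGetD ys j 0)) (init, PySem.Dict.empty)
    let d := st.2.insert (st.1.1, st.1.2.1) st.1.2.2
    d.items.map (fun p => (p.1.1, p.1.2, p.2))

-- ===== PORT B =====
-- counts = {}; for x in inputs: counts[x] = counts.get(x, 0) + 1
def pvCounts (ys : List Int) : PySem.Dict Int Int :=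
  ys.foldl (fun d x => d.insert x (d.getD x 0 + 1)) PySem.Dict.empty

-- the while loop 'while end+1 in counts: end += 1; total += counts[end]', run with fuel
-- = number of keys of counts, which always exceeds the number of iterations (each step
-- moves to a fresh key), so the fuel is never exhausted and the port is exact
def pvExtend (counts : PySem.Dict Int Int) : Nat → Int → Int → Int × Int
  | 0, e, tot => (e, tot)
  | f + 1, e, tot =>
    if counts.contains (e + 1) then pvExtend counts f (e + 1) (tot + counts.getD (e + 1) 0)
    else (e, tot)

-- counts[start] is read with getD 0: exact, since every start is a key of counts
def detect_range_and_count_readings_alt (inputs : List Int) : List (Int × Int × Int) :=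
  if inputs.length == 0 then []
  else
    let ys := PySem.List.sorted inputs (fun x => x) false
    let counts := pvCounts ys
    let starts := PySem.List.sorted
      (counts.keys.filter (fun s => !(counts.contains (s - 1)))) (fun x => x) false
    let out := starts.foldl (fun out s =>
      out.insert (s, (pvExtend counts counts.keys.length s (counts.getD s 0)).1)
        (pvExtend counts counts.keys.length s (counts.getD s 0)).2) PySem.Dict.empty
    out.items.map (fun p => (p.1.1, p.1.2, p.2))

-- ===== PRECONDITION & SPEC =====
def Spec_detect_range_and_count_readings (inputs : List Int) (out : List (Int × Int × Int)) : Prop := out = detect_range_and_count_readings_alt inputs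
instance (inputs : List Int) (out : List (Int × Int × Int)) : Decidable (Spec_detect_range_and_count_readings inputs out) := by unfold Spec_detect_range_and_count_readings; infer_instance

-- ===== CLAIM (what is proved, stated in full; the proofs are below) =====
def Claim_equal_detect_range_and_count_readings : Prop := ∀ (inputs : List Int), Dom_detect_range_and_count_readings inputs → Spec_detect_range_and_count_readings inputs (detect_range_and_count_readings inputs)

-- ===== LEMMAS AND PROOFS =====

-- proof-side reference decomposition of the sorted list into maximal gap-≤-1 groups
def pvTake (e : Int) : List Int → List Int × List Int
  | [] => ([], [])
  | y :: t => if y = e + 1 ∨ y = e then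
      let p := pvTake y t; (y :: p.1, p.2)
    else ([], y :: t)

lemma pvTake_snd_length (t : List Int) : ∀ e, (pvTake e t).2.length ≤ t.length := by
  induction t with
  | nil => intro e; simp [pvTake]
  | cons y t' ih =>
    intro e
    by_cases h : y = e + 1 ∨ y = e
    · simp only [pvTake, if_pos h]
      exact le_trans (ih y) (by simp)
    · simp [pvTake, if_neg h]

def pvGroups : List Int → List (Int × List Int)
  | [] => []
  | x :: t => (x, (pvTake x t).1) :: pvGroups (pvTake x t).2
termination_by l => l.length
decreasing_by
  exact Nat.lt_succ_of_le (pvTake_snd_length t x)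

def pvTrip (p : Int × List Int) : Int × Int × Int :=
  (p.1, p.2.getLastD p.1, (p.2.length : Int) + 1)

def pvItemTriple (p : (Int × Int) × Int) : Int × Int × Int := (p.1.1, p.1.2, p.2)

-- structural facts about one pvTake step on a sorted list
lemma pvTake_props (t : List Int) : ∀ e, List.Pairwise (· ≤ ·) (e :: t) →
    (pvTake e t).1 ++ (pvTake e t).2 = t
  ∧ e ≤ (pvTake e t).1.getLastD e
  ∧ (∀ y ∈ (pvTake e t).1, e ≤ y ∧ y ≤ (pvTake e t).1.getLastD e)
  ∧ (∀ k : Int, e ≤ k → k ≤ (pvTake e t).1.getLastD e → k ∈ e :: (pvTake e t).1)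
  ∧ (∀ z ∈ (pvTake e t).2, (pvTake e t).1.getLastD e + 1 < z) := by
  induction t with
  | nil =>
    intro e _
    simp [pvTake]
    omega
  | cons y t' ih =>
    intro e hpw
    have hey : e ≤ y := (List.pairwise_cons.mp hpw).1 y (by simp)
    have hpw' : List.Pairwise (· ≤ ·) (y :: t') := (List.pairwise_cons.mp hpw).2
    by_cases hm : y = e + 1 ∨ y = e
    · obtain ⟨i1, i2, i3, i4, i5⟩ := ih y hpw'
      simp only [pvTake, if_pos hm]
      have hlast : (y :: (pvTake y t').1).getLastD e = (pvTake y t').1.getLastD y :=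
        List.getLastD_cons
      refine ⟨by simpa using i1, ?_, ?_, ?_, ?_⟩
      · rw [hlast]
        rcases hm with h | h <;> omega
      · intro z hz
        rw [hlast]
        rcases List.mem_cons.mp hz with h | h
        · subst h; exact ⟨hey, i2⟩
        · obtain ⟨h1, h2⟩ := i3 z h
          exact ⟨le_trans hey h1, h2⟩
      · intro k hk1 hk2
        rw [hlast] at hk2
        by_cases hky : y ≤ k
        · have := i4 k hky hk2
          rcases List.mem_cons.mp this with h | h
          · simp [h]
          · simp [h]
        · have hke : k = e := by rcases hm with h | h <;> omega
          simp [hke]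
      · intro z hz
        rw [hlast]
        exact i5 z hz
    · simp only [pvTake, if_neg hm]
      have hgt : e + 1 < y := by
        rcases (not_or.mp hm) with ⟨h1, h2⟩
        omega
      refine ⟨rfl, le_refl e, by simp, ?_, ?_⟩
      · intro k hk1 hk2
        simp only [List.getLastD_nil] at hk2
        have : k = e := le_antisymm hk2 hk1
        simp [this]
      · intro z hz
        simp only [List.getLastD_nil]
        rcases List.mem_cons.mp hz with h | h
        · omega
        · have := (List.pairwise_cons.mp hpw').1 z h
          omega

lemma master (n : Nat) : ∀ (u : List Int), u.length ≤ n → List.Pairwise (· ≤ ·) u →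
    ((pvGroups u).map Prod.fst).Pairwise (· < ·)
  ∧ (∀ s : Int, s ∈ (pvGroups u).map Prod.fst ↔ s ∈ u ∧ (s - 1) ∉ u)
  ∧ (∀ p ∈ pvGroups u,
       p.1 ≤ p.2.getLastD p.1
     ∧ (∀ k : Int, p.1 ≤ k → k ≤ p.2.getLastD p.1 → k ∈ u)
     ∧ (p.2.getLastD p.1 + 1) ∉ u
     ∧ u.countP (fun v => decide (p.1 - 1 < v) && decide (v ≤ p.2.getLastD p.1)) = p.2.length + 1) := by
  induction n with
  | zero =>
    intro u hu _
    have : u = [] := List.eq_nil_of_length_eq_zero (Nat.le_zero.mp hu)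
    subst this
    simp [pvGroups]
  | succ n ihn =>
    intro u hu hpw
    cases u with
    | nil => simp [pvGroups]
    | cons h t =>
      obtain ⟨P1, P2, P3, P5, P6⟩ := pvTake_props t h hpw
      set g := (pvTake h t).1 with hg
      set r := (pvTake h t).2 with hr
      set L := g.getLastD h with hL
      have hpwt : List.Pairwise (· ≤ ·) t := (List.pairwise_cons.mp hpw).2
      have hrsub : r.Sublist t := by
        rw [← P1]; exact List.sublist_append_right g r
      have hpwr : List.Pairwise (· ≤ ·) r := hpwt.sublist hrsub
      have hrlen : r.length ≤ n := by
        have := pvTake_snd_length t h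
        simp only [← hr] at this
        have hlt : t.length ≤ n := by simpa using hu
        omega
      obtain ⟨I1, I2, I3⟩ := ihn r hrlen hpwr
      have hgr : pvGroups (h :: t) = (h, g) :: pvGroups r := by
        rw [pvGroups]
      have hsplit : h :: t = (h :: g) ++ r := by
        simp [P1]
      have hmemu : ∀ v : Int, v ∈ h :: t ↔ v ∈ h :: g ∨ v ∈ r := by
        intro v; rw [hsplit, List.mem_append]
      -- elements of the first group lie in [h, L]
      have hA1 : ∀ v ∈ h :: g, h ≤ v ∧ v ≤ L := by
        intro v hv
        rcases List.mem_cons.mp hv with hv | hv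
        · rw [hv]; exact ⟨le_refl h, P2⟩
        · exact P3 v hv
      -- heads of later groups are members of r
      have hheadr : ∀ s : Int, s ∈ (pvGroups r).map Prod.fst → s ∈ r := by
        intro s hs
        exact ((I2 s).mp hs).1
      constructor
      · -- pairwise < of the heads
        rw [hgr]
        simp only [List.map_cons]
        refine List.pairwise_cons.mpr ⟨?_, I1⟩
        intro s hs
        have hsr := hheadr s hs
        have := P6 s hsr
        omega
      constructor
      · -- head characterisation
        intro s
        rw [hgr]
        simp only [List.map_cons]
        rw [List.mem_cons]
        constructor
        · rintro (hs | hs)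
          · subst hs
            refine ⟨by simp, ?_⟩
            intro hmem
            rcases (hmemu _).mp hmem with hm | hm
            · have := hA1 _ hm; omega
            · have := P6 _ hm; omega
          · obtain ⟨hs1, hs2⟩ := (I2 s).mp hs
            have hsgt := P6 s hs1
            refine ⟨(hmemu _).mpr (Or.inr hs1), ?_⟩
            intro hmem
            rcases (hmemu _).mp hmem with hm | hm
            · have := hA1 _ hm; omega
            · exact hs2 hm
        · rintro ⟨hs1, hs2⟩
          rcases (hmemu _).mp hs1 with hm | hm
          · left
            by_contra hne
            have hb := hA1 s hm
            have hlt : h < s := by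
              rcases List.mem_cons.mp hm with h' | h'
              · exact absurd h' hne
              · rcases lt_or_eq_of_le (P3 s h').1 with h'' | h''
                · exact h''
                · exact absurd h''.symm hne
            have : s - 1 ∈ h :: g := P5 (s - 1) (by omega) (by omega)
            exact hs2 ((hmemu _).mpr (Or.inl this))
          · right
            apply (I2 s).mpr
            refine ⟨hm, ?_⟩
            intro hmr
            exact hs2 ((hmemu _).mpr (Or.inr hmr))
      · -- per-group facts
        intro p hp
        rw [hgr] at hp
        rcases List.mem_cons.mp hp with hp | hp
        · subst hp
          simp only
          refine ⟨P2, ?_, ?_, ?_⟩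
          · intro k hk1 hk2
            exact (hmemu _).mpr (Or.inl (P5 k hk1 hk2))
          · intro hmem
            rcases (hmemu _).mp hmem with hm | hm
            · have := hA1 _ hm; omega
            · have := P6 _ hm; omega
          · rw [hsplit, List.countP_append]
            have c1 : (h :: g).countP (fun v => decide (h - 1 < v) && decide (v ≤ L)) = (h :: g).length := by
              rw [List.countP_eq_length]
              intro a ha
              have := hA1 a ha
              simp only [Bool.and_eq_true, decide_eq_true_eq]
              omega
            have c2 : r.countP (fun v => decide (h - 1 < v) && decide (v ≤ L)) = 0 := by
              rw [List.countP_eq_zero]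
              intro a ha
              have := P6 a ha
              simp only [Bool.and_eq_true, decide_eq_true_eq]
              omega
            rw [c1, c2]
            simp
        · obtain ⟨J1, J2, J3, J4⟩ := I3 p hp
          have hpr : p.1 ∈ r := hheadr p.1 (List.mem_map.mpr ⟨p, hp, rfl⟩)
          have hp1 : L + 1 < p.1 := P6 p.1 hpr
          refine ⟨J1, ?_, ?_, ?_⟩
          · intro k hk1 hk2
            exact (hmemu _).mpr (Or.inr (J2 k hk1 hk2))
          · intro hmem
            rcases (hmemu _).mp hmem with hm | hm
            · have := hA1 _ hm; omega
            · exact J3 hm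
          · rw [hsplit, List.countP_append]
            have c1 : (h :: g).countP (fun v => decide (p.1 - 1 < v) && decide (v ≤ p.2.getLastD p.1)) = 0 := by
              rw [List.countP_eq_zero]
              intro a ha
              have := hA1 a ha
              simp only [Bool.and_eq_true, decide_eq_true_eq]
              omega
            rw [c1, J4]
            simp

-- A's fold over the tail produces the group triples
lemma A_fold (t : List Int) : ∀ (s e n : Int) (d : PySem.Dict (Int × Int) Int),
    List.Pairwise (· ≤ ·) (e :: t) → s ≤ e → (∀ k ∈ d.keys, k.1 < s) →
    (((t.foldl pvLoopA ((s, e, n), d)).2.insert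
        ((t.foldl pvLoopA ((s, e, n), d)).1.1, (t.foldl pvLoopA ((s, e, n), d)).1.2.1)
        (t.foldl pvLoopA ((s, e, n), d)).1.2.2).items).map pvItemTriple
    = d.items.map pvItemTriple
      ++ (s, (pvTake e t).1.getLastD e, n + ((pvTake e t).1.length : Int))
         :: (pvGroups (pvTake e t).2).map pvTrip := by
  induction t with
  | nil =>
    intro s e n d _ _ hfresh
    have hnc : d.contains (s, e) = false := by
      cases hc : d.contains (s, e) with
      | false => rfl
      | true =>
        have hk := (PySem.Dict.contains_iff_mem_keys d (s, e)).mp hc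
        have := hfresh _ hk
        simp at this
    simp only [List.foldl_nil]
    rw [PySem.Dict.items_insert_of_not_contains d _ hnc]
    simp [pvTake, pvGroups, pvItemTriple]
  | cons y t' ih =>
    intro s e n d hpw hse hfresh
    have hey : e ≤ y := (List.pairwise_cons.mp hpw).1 y (by simp)
    have hpw' : List.Pairwise (· ≤ ·) (y :: t') := (List.pairwise_cons.mp hpw).2
    simp only [List.foldl_cons]
    by_cases hm : y = e + 1 ∨ y = e
    · have hA : pvLoopA ((s, e, n), d) y = ((s, y, n + 1), d) := by
        simp [pvLoopA, hm]
      rw [hA]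
      have := ih s y (n + 1) d hpw' (le_trans hse hey) hfresh
      rw [this]
      simp only [pvTake, if_pos hm]
      rw [List.getLastD_cons]
      simp only [List.length_cons]
      push_cast
      ring_nf
    · have hgt : e + 1 < y := by
        rcases (not_or.mp hm) with ⟨h1, h2⟩
        omega
      have hA : pvLoopA ((s, e, n), d) y = ((y, y, 1), d.insert (s, e) n) := by
        rcases (not_or.mp hm) with ⟨h1, h2⟩
        simp [pvLoopA, h1, h2]
      rw [hA]
      have hnc : d.contains (s, e) = false := by
        cases hc : d.contains (s, e) with
        | false => rfl
        | true =>
          have hk := (PySem.Dict.contains_iff_mem_keys d (s, e)).mp hc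
          have := hfresh _ hk
          simp at this
      have hfresh' : ∀ k ∈ (d.insert (s, e) n).keys, k.1 < y := by
        intro k hk
        rcases (PySem.Dict.mem_keys_insert d (s, e) k n).mp hk with h | h
        · rw [h]; simp; omega
        · have := hfresh _ h; omega
      have := ih y y 1 (d.insert (s, e) n) hpw' le_rfl hfresh'
      rw [this]
      rw [PySem.Dict.items_insert_of_not_contains d _ hnc]
      simp only [pvTake, if_neg hm]
      rw [pvGroups]
      simp [pvItemTriple, pvTrip]
      ring_nf

-- counting split: elements in (e, L] = multiplicity of e+1 plus elements in (e+1, L]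
lemma countP_split (u : List Int) (e L : Int) (h : e < L) :
    u.countP (fun v => decide (e < v) && decide (v ≤ L))
      = u.count (e + 1) + u.countP (fun v => decide (e + 1 < v) && decide (v ≤ L)) := by
  induction u with
  | nil => simp
  | cons x u ih =>
    simp only [List.countP_cons, List.count_cons, ih]
    by_cases h1 : x = e + 1
    · subst h1
      have hb : ((e + 1 : Int) == e + 1) = true := by simp
      have c1 : (decide (e < e + 1) && decide (e + 1 ≤ L)) = true := by
        simp; omega
      have c2 : (decide (e + 1 < e + 1) && decide (e + 1 ≤ L)) = false := by
        simp
      rw [hb, c1, c2]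
      simp
      omega
    · have hb : (x == e + 1) = false := by simpa using h1
      rw [hb]
      by_cases h2 : e < x ∧ x ≤ L
      · have c1 : (decide (e < x) && decide (x ≤ L)) = true := by simp; omega
        have c2 : (decide (e + 1 < x) && decide (x ≤ L)) = true := by simp; omega
        rw [c1, c2]; simp; omega
      · have c1 : (decide (e < x) && decide (x ≤ L)) = false := by
          simp; omega
        have c2 : (decide (e + 1 < x) && decide (x ≤ L)) = false := by
          simp; omega
        rw [c1, c2]; simp

lemma pvExtend_run (u : List Int) (L : Int) (hL1 : (L + 1) ∉ u) :
    ∀ (fuel : Nat) (e tot : Int), e ≤ L → (L - e).toNat ≤ fuel →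
    (∀ k : Int, e < k → k ≤ L → k ∈ u) →
    pvExtend (PySem.Dict.counter u) fuel e tot
      = (L, tot + (u.countP (fun v => decide (e < v) && decide (v ≤ L)) : Int)) := by
  intro fuel
  induction fuel with
  | zero =>
    intro e tot he hf _
    have heL : e = L := by omega
    subst heL
    have hz : u.countP (fun v => decide (e < v) && decide (v ≤ e)) = 0 := by
      rw [List.countP_eq_zero]
      intro a _
      simp only [Bool.and_eq_true, decide_eq_true_eq]
      omega
    simp [pvExtend, hz]
  | succ f ihf =>
    intro e tot he hf hcov
    by_cases heL : e = L
    · subst heL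
      have hc : (PySem.Dict.counter u).contains (e + 1) = false := by
        rw [PySem.Dict.contains_counter]
        simpa using hL1
      have hz : u.countP (fun v => decide (e < v) && decide (v ≤ e)) = 0 := by
        rw [List.countP_eq_zero]
        intro a _
        simp only [Bool.and_eq_true, decide_eq_true_eq]
        omega
      simp [pvExtend, hc, hz]
    · have helt : e < L := lt_of_le_of_ne he heL
      have hc : (PySem.Dict.counter u).contains (e + 1) = true := by
        rw [PySem.Dict.contains_counter]
        simpa using hcov (e + 1) (by omega) (by omega)
      simp only [pvExtend, hc, if_true, PySem.Dict.getD_counter]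
      rw [ihf (e + 1) (tot + (u.count (e + 1) : Int)) (by omega) (by omega)
        (fun k hk1 hk2 => hcov k (by omega) hk2)]
      rw [countP_split u e L helt]
      push_cast
      ring_nf

-- inserting pairwise-fresh keys appends to items
lemma foldl_insert_items (F : Int → Int × Int) : ∀ (hs : List Int) (d : PySem.Dict (Int × Int) Int),
    hs.Pairwise (· < ·) → (∀ h ∈ hs, ∀ k ∈ d.keys, k.1 ≠ h) →
    (hs.foldl (fun out s => out.insert (s, (F s).1) (F s).2) d).items
      = d.items ++ hs.map (fun h => ((h, (F h).1), (F h).2)) := by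
  intro hs
  induction hs with
  | nil => intro d _ _; simp
  | cons h hs' ih =>
    intro d hpw hkeys
    have hnc : d.contains (h, (F h).1) = false := by
      cases hc : d.contains (h, (F h).1) with
      | false => rfl
      | true =>
        have hk := (PySem.Dict.contains_iff_mem_keys d _).mp hc
        have := hkeys h (by simp) _ hk
        simp at this
    simp only [List.foldl_cons]
    rw [ih (d.insert (h, (F h).1) (F h).2) (List.pairwise_cons.mp hpw).2 ?_]
    · rw [PySem.Dict.items_insert_of_not_contains d _ hnc]
      simp
    · intro h' hh' k hk
      rcases (PySem.Dict.mem_keys_insert d _ k _).mp hk with hx | hx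
      · rw [hx]
        have := (List.pairwise_cons.mp hpw).1 h' hh'
        simp
        omega
      · exact hkeys h' (by simp [hh']) k hx

-- A's sorted-scan equals the group triples
lemma A_eq (inputs : List Int) (hne : inputs ≠ []) :
    detect_range_and_count_readings inputs
      = (pvGroups (PySem.List.sorted inputs (fun x => x) false)).map pvTrip := by
  have hvalid : pvCheckIfInputsValid inputs = true := by
    simp [pvCheckIfInputsValid, List.length_eq_zero_iff, hne]
  unfold detect_range_and_count_readings
  cases hys : PySem.List.sorted inputs (fun x => x) false with
  | nil => exact absurd ((PySem.List.sorted_eq_nil_iff inputs _ false).mp hys) hne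
  | cons y t =>
    simp only [hvalid, Bool.not_true, Bool.false_eq_true, if_false]
    have hpw : List.Pairwise (· ≤ ·) (y :: t) := by
      have hp := PySem.List.sorted_pairwise inputs (fun x => x)
      rw [hys] at hp
      exact hp
    have hfold := PySem.List.foldl_pyRange_pyGetD' (y :: t) 0 pvLoopA
      ((pvResetValues (y :: t) 0), PySem.Dict.empty) (a := 1) (by omega)
    simp only [show ((1 : Int)).toNat = 1 from rfl, List.drop_succ_cons, List.drop_zero] at hfold
    rw [hfold]
    rw [show pvResetValues (y :: t) 0 = (y, y, 1) by
      simp [pvResetValues, PySem.List.pyGetD_zero_cons]]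
    have := A_fold t y y 1 PySem.Dict.empty hpw le_rfl (by simp [PySem.Dict.keys_empty])
    rw [show (fun p : (Int × Int) × Int => (p.1.1, p.1.2, p.2)) = pvItemTriple from rfl, this]
    rw [pvGroups]
    simp [pvTrip, show (PySem.Dict.empty : PySem.Dict (Int × Int) Int).items = [] from rfl]
    ring_nf

-- B's frequency-map algorithm equals the group triples
lemma B_eq (inputs : List Int) (hne : inputs ≠ []) :
    detect_range_and_count_readings_alt inputs
      = (pvGroups (PySem.List.sorted inputs (fun x => x) false)).map pvTrip := by
  have hlen : (inputs.length == 0) = false := by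
    simp [List.length_eq_zero_iff, hne]
  unfold detect_range_and_count_readings_alt
  rw [hlen]
  simp only [Bool.false_eq_true, if_false]
  set ys := PySem.List.sorted inputs (fun x => x) false with hys
  have hpw : List.Pairwise (· ≤ ·) ys := PySem.List.sorted_pairwise inputs (fun x => x)
  have hcnt : pvCounts ys = PySem.Dict.counter ys :=
    PySem.Dict.foldl_insert_getD_add_one_eq_counter ys
  obtain ⟨M1, M2, M3⟩ := master ys.length ys le_rfl hpw
  have hkeys : (pvCounts ys).keys = PySem.Set.ofList ys := by
    rw [hcnt]; exact PySem.Dict.keys_counter ys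
  have hheads_nodup : ((pvGroups ys).map Prod.fst).Nodup := M1.imp (fun h => ne_of_lt h)
  -- the sorted filtered key list is exactly the list of group heads
  have hstarts : PySem.List.sorted
      ((pvCounts ys).keys.filter (fun s => !((pvCounts ys).contains (s - 1)))) (fun x => x) false
      = (pvGroups ys).map Prod.fst := by
    apply PySem.List.sorted_eq_of_perm_of_pairwise_lt _ _ _ _ M1
    rw [List.perm_ext_iff_of_nodup hheads_nodup
      (List.Nodup.filter _ (by rw [hkeys]; exact PySem.Set.nodup_ofList ys))]
    intro a
    rw [List.mem_filter, hkeys, PySem.Set.mem_ofList, M2 a]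
    constructor
    · rintro ⟨h1, h2⟩
      refine ⟨h1, ?_⟩
      rw [hcnt, PySem.Dict.contains_counter]
      simpa using h2
    · rintro ⟨h1, h2⟩
      rw [hcnt, PySem.Dict.contains_counter] at h2
      refine ⟨h1, ?_⟩
      simpa using h2
  -- each extension run returns (group last, group size)
  have hext : ∀ p ∈ pvGroups ys,
      pvExtend (pvCounts ys) (pvCounts ys).keys.length p.1 ((pvCounts ys).getD p.1 0)
        = (p.2.getLastD p.1, (p.2.length : Int) + 1) := by
    intro p hp
    obtain ⟨G1, G2, G3, G4⟩ := M3 p hp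
    have hsub : Finset.Icc p.1 (p.2.getLastD p.1) ⊆ (PySem.Set.ofList ys).toFinset := by
      intro k hk
      simp only [Finset.mem_Icc] at hk
      rw [List.mem_toFinset, PySem.Set.mem_ofList]
      exact G2 k hk.1 hk.2
    have hcard := Finset.card_le_card hsub
    rw [Int.card_Icc] at hcard
    have hcard2 : (PySem.Set.ofList ys).toFinset.card = (PySem.Set.ofList ys).length :=
      List.toFinset_card_of_nodup (PySem.Set.nodup_ofList ys)
    rw [hcnt, PySem.Dict.getD_counter]
    have hfuel2 : (p.2.getLastD p.1 - p.1).toNat ≤ (PySem.Dict.counter ys).keys.length := by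
      rw [PySem.Dict.keys_counter]; omega
    rw [pvExtend_run ys (p.2.getLastD p.1) G3 _ p.1 _ G1 hfuel2
      (fun k hk1 hk2 => G2 k (by omega) hk2)]
    have hsplit2 := countP_split ys (p.1 - 1) (p.2.getLastD p.1) (by omega)
    rw [show p.1 - 1 + 1 = p.1 by ring] at hsplit2
    rw [hsplit2] at G4
    refine Prod.ext rfl ?_
    simp only
    omega
  have hout := foldl_insert_items
    (fun s => pvExtend (pvCounts ys) (pvCounts ys).keys.length s ((pvCounts ys).getD s 0))
    ((pvGroups ys).map Prod.fst) PySem.Dict.empty M1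
    (by simp [PySem.Dict.keys_empty])
  rw [hstarts, hout]
  simp only [show (PySem.Dict.empty : PySem.Dict (Int × Int) Int).items = [] from rfl,
    List.nil_append]
  rw [List.map_map, List.map_map]
  apply List.map_congr_left
  intro p hp
  simp only [Function.comp_apply]
  rw [hext p hp]
  simp [pvTrip]

-- ===== VERDICT (by name: the statement is the Claim_ definition above) =====
theorem detect_range_and_count_readings_spec : Claim_equal_detect_range_and_count_readings := by
  intro inputs _
  unfold Spec_detect_range_and_count_readings
  by_cases hne : inputs = []
  · subst hne; rfl
  · rw [A_eq inputs hne, B_eq inputs hne]
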